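-- pv_equiv track=rewrite | github.com/mouredev/Weekly-Challenge-2022-Kotlin | app/src/main/java/com/mouredev/weeklychallenge2022/reto_#34.py | validate_digits
-- ===== SOURCE A (Python) =====
-- def validate_digits(lista_string):
--     '''
--     ## 1. Descripción
--     -----------------
--     Verifica que cada elemento (string) de la lista entregada tenga el formato de un número ya sea positivo o negativo
--
--     ## 2. Parámetros entrada:
--     -------------------
--     Lista de string: List
--
--     ## 3. Parámetros salida:
--     ------------------
--     0: No se cumple con el formato de un número positivo o negativo
--     1: Se cumple con el formato de un número
--
--     ## 4. Proceso
--     -------------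
--     Pimero se separa la para interior del arreglo con formato de string y se separa a través de las comas.
--     Posteriormente, se verificada cada elemento del arreglo.
--     PAra ello, se valida primero si posee algún signo '-' para verificar si son negativos. En caso lo sea, se empieza evaluar los dígitos
--     después de ese signo, verificando si estan en el rango de número de su respectivo código ASCII.
--     En caso no se tenga el signo '-' se evalua igualmente pero desde el comienzo.
--     '''
--     lista_string = lista_string[1:len(lista_string)-1].split(',')
--     element = 0
--     while element < len(lista_string):
--
--         signal = lista_string[element].count('-')
--
--         if signal != 1:
--             initial = 0
--         else:
--             initial = 1
--
--         for i in range(initial,len(lista_string[element])):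
--             if (ord(lista_string[element][i]) < 48) or (ord(lista_string[element][i]) > 57):
--                 return 0
--         element+=1
--
--     return 1
-- ===== SOURCE B (Python) =====
-- def validate_digits(lista_string):
--     # Single left-to-right pass over the inner characters with a token-start
--     # flag: no split(), no per-token scanning, O(1) extra space.
--     at_start = True
--     for c in lista_string[1:len(lista_string)-1]:
--         if c == ',':
--             at_start = True
--         elif at_start and c == '-':
--             at_start = False
--         elif '0' <= c <= '9':
--             at_start = False
--         else:
--             return 0
--     return 1
-- ===== Notes on version B (the rewrite author's own statement) =====
-- stated objective: alternative
-- what changed: Replaces the comma-split plus per-token minus-count/ord-range scan with a single character-by-character state machine over the inner string that tracks whether the scan is at a token start.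
import Mathlib
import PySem

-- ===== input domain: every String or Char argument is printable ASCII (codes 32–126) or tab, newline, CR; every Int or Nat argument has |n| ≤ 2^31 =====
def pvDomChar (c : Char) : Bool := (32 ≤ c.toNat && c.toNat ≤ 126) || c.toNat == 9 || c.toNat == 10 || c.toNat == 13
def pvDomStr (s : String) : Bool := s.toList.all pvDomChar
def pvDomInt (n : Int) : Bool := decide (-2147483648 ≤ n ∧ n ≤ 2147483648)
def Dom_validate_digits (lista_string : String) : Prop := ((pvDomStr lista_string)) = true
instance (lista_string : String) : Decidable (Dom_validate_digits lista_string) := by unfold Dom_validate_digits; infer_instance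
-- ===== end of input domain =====

-- B replaces A's comma-split plus per-token minus-count/ord-range scan by one state-machine pass over the inner string (alternative, same cost).

-- ===== PORT A =====
-- the body of A's inner `for i in range(initial, len(tok))` loop, with the early `return 0` rendered as an all-check
def pvA_tokOK (tok : List Char) : Bool :=
  let signal := PySem.Chars.count tok ['-']
  let initial : Int := if signal ≠ 1 then 0 else 1
  (PySem.List.pyRange initial (PySem.List.len tok)).all
    (fun i => !(decide ((PySem.List.pyGetD tok i ' ').toNat < 48) ||
                decide (57 < (PySem.List.pyGetD tok i ' ').toNat)))

-- A's outer `while element < len(...)` loop with its early `return 0`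
def pvA_loop : List (List Char) → Int
  | [] => 1
  | t :: ts => if pvA_tokOK t then pvA_loop ts else 0

def validate_digits (lista_string : String) : Int :=
  pvA_loop (PySem.Chars.splitOn
    (PySem.List.slice lista_string.toList (some 1) (some (PySem.Str.len lista_string - 1))) [','])

-- ===== PORT B =====
-- B's single for-loop over the inner characters, carrying the `at_start` flag; early `return 0` = the final branch
def pvB_scan : List Char → Bool → Int
  | [], _ => 1
  | c :: cs, atStart =>
    if c = ',' then pvB_scan cs true
    else if atStart && decide (c = '-') then pvB_scan cs false
    else if '0' ≤ c ∧ c ≤ '9' then pvB_scan cs false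
    else 0

def validate_digits_alt (lista_string : String) : Int :=
  pvB_scan (PySem.List.slice lista_string.toList (some 1) (some (PySem.Str.len lista_string - 1))) true

-- ===== PRECONDITION & SPEC =====
def Spec_validate_digits (lista_string : String) (out : Int) : Prop := out = validate_digits_alt lista_string
instance (lista_string : String) (out : Int) : Decidable (Spec_validate_digits lista_string out) := by unfold Spec_validate_digits; infer_instance

-- ===== CLAIM (what is proved, stated in full; the proofs are below) =====
def Claim_equal_validate_digits : Prop := ∀ (lista_string : String), Dom_validate_digits lista_string → Spec_validate_digits lista_string (validate_digits lista_string)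

-- ===== LEMMAS AND PROOFS =====

/-- Recursive single-char split on ',': (first token, remaining tokens). -/
def pvSp : List Char → List Char × List (List Char)
  | [] => ([], [])
  | c :: cs =>
    if c = ',' then ([], (pvSp cs).1 :: (pvSp cs).2)
    else (c :: (pvSp cs).1, (pvSp cs).2)

lemma pvSplitOn_go_eq (l : List Char) : ∀ (fuel : Nat) (cur : List Char) (acc : List (List Char)),
    l.length ≤ fuel →
    PySem.Chars.splitOn.go [','] fuel l cur acc
      = acc.reverse ++ (cur.reverse ++ (pvSp l).1) :: (pvSp l).2 := by
  induction l with
  | nil => intro fuel cur acc _; cases fuel <;> simp [PySem.Chars.splitOn.go, pvSp]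
  | cons c rest ih =>
    intro fuel cur acc hf
    cases fuel with
    | zero => simp at hf
    | succ fuel =>
      rw [PySem.Chars.splitOn.go.eq_def]
      simp only [List.length_cons, Nat.add_le_add_iff_right] at hf
      by_cases hc : c = ','
      · subst hc
        simp only [List.isPrefixOf_cons₂_self, List.isPrefixOf_nil_left, if_pos]
        simp only [List.length_singleton, List.drop_one, List.tail_cons]
        rw [ih fuel [] (cur.reverse :: acc) hf]
        simp [pvSp]
      · simp only [List.isPrefixOf_cons₂, List.isPrefixOf_nil_left, Bool.and_true,
          beq_eq_false_iff_ne.mpr (Ne.symm hc), Bool.false_eq_true, if_false]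
        rw [ih fuel (c :: cur) acc hf]
        simp [pvSp, hc]

lemma pvSplitOn_eq (cs : List Char) :
    PySem.Chars.splitOn cs [','] = (pvSp cs).1 :: (pvSp cs).2 := by
  unfold PySem.Chars.splitOn
  rw [pvSplitOn_go_eq cs (cs.length + 1) [] [] (by omega)]
  simp

def pvIsDig (c : Char) : Bool := decide (48 ≤ c.toNat) && decide (c.toNat ≤ 57)

lemma pvCount_go_eq (l : List Char) : ∀ (fuel acc : Nat), l.length ≤ fuel →
    PySem.Chars.count.go ['-'] fuel l acc = acc + l.count '-' := by
  induction l with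
  | nil => intro fuel acc _; cases fuel <;> simp [PySem.Chars.count.go]
  | cons c rest ih =>
    intro fuel acc hf
    cases fuel with
    | zero => simp at hf
    | succ fuel =>
      rw [PySem.Chars.count.go.eq_def]
      simp only [List.length_cons, Nat.add_le_add_iff_right] at hf
      by_cases hc : c = '-'
      · subst hc
        simp only [List.isPrefixOf_cons₂_self, List.isPrefixOf_nil_left, if_pos]
        simp only [List.length_singleton, List.drop_one, List.tail_cons]
        rw [ih fuel (acc + 1) hf]
        simp
        omega
      · simp only [List.isPrefixOf_cons₂, List.isPrefixOf_nil_left, Bool.and_true,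
          beq_eq_false_iff_ne.mpr (Ne.symm hc), Bool.false_eq_true, if_false]
        rw [ih fuel acc hf]
        simp [hc]

lemma pvCount_eq (t : List Char) : PySem.Chars.count t ['-'] = t.count '-' := by
  unfold PySem.Chars.count
  simp [pvCount_go_eq t t.length 0 (le_refl _)]

/-- A's per-token check is: drop the first char iff count('-') = 1, then all digits. -/
lemma pvA_tokOK_eq (t : List Char) :
    pvA_tokOK t = (if t.count '-' = 1 then t.drop 1 else t).all pvIsDig := by
  have hmap : ∀ (a : Int), 0 ≤ a →
      (PySem.List.pyRange a (PySem.List.len t)).all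
        (fun i => !(decide ((PySem.List.pyGetD t i ' ').toNat < 48) ||
                    decide (57 < (PySem.List.pyGetD t i ' ').toNat)))
      = (t.drop a.toNat).all pvIsDig := by
    intro a ha
    rw [← PySem.List.map_pyGetD_pyRange t ' ' ha, List.all_map]
    exact List.all_congr rfl (fun x => by
      simp only [Bool.not_or, ← decide_not]
      simp
      rfl)
  unfold pvA_tokOK
  rw [pvCount_eq]
  show (PySem.List.pyRange (if t.count '-' ≠ 1 then 0 else 1) (PySem.List.len t)).all _ = _
  by_cases h1 : t.count '-' = 1
  · rw [if_neg (show ¬ t.count '-' ≠ 1 from by omega), if_pos h1]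
    simpa using hmap 1 (by omega)
  · rw [if_pos h1, if_neg h1]
    simpa using hmap 0 (by omega)

lemma pvNotAll_of_count (h : List Char) (hc : h.count '-' ≠ 0) : h.all pvIsDig = false := by
  have hm : '-' ∈ h := by
    by_contra hm
    exact hc (List.count_eq_zero.mpr hm)
  exact List.all_eq_false.mpr ⟨'-', hm, by decide⟩

/-- A's per-token check on a nonempty token: head is '-' or a digit, tail all digits. -/
lemma pvA_tokOK_cons (c : Char) (h : List Char) :
    pvA_tokOK (c :: h) = ((c == '-' || pvIsDig c) && h.all pvIsDig) := by
  rw [pvA_tokOK_eq]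
  by_cases hc : c = '-'
  · subst hc
    by_cases h0 : h.count '-' = 0
    · have hcnt : ('-' :: h).count '-' = 1 := by simp [h0]
      rw [if_pos hcnt]
      simp
    · have hcnt : ('-' :: h).count '-' ≠ 1 := by simp; omega
      rw [if_neg hcnt]
      simp [List.all_cons, pvNotAll_of_count h h0]
  · have hcc : (c == '-') = false := beq_eq_false_iff_ne.mpr hc
    by_cases h1 : h.count '-' = 1
    · have hcnt : (c :: h).count '-' = 1 := by simp [List.count_cons, hcc, h1]
      rw [if_pos hcnt]
      simp [pvNotAll_of_count h (by omega)]
    · have hcnt : (c :: h).count '-' ≠ 1 := by simp [List.count_cons, hcc]; omega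
      rw [if_neg hcnt]
      rw [List.all_cons, hcc]
      simp

lemma pvIsDig_iff (c : Char) : pvIsDig c = (decide ('0' ≤ c) && decide (c ≤ '9')) := by
  simp only [pvIsDig, Char.le_def, Char.toNat]
  congr 1

/-- The heart of the equivalence: B's state machine against A's token loop, in both states. -/
lemma pvScan_eq (cs : List Char) :
    (pvB_scan cs true = pvA_loop ((pvSp cs).1 :: (pvSp cs).2)) ∧
    (pvB_scan cs false = if (pvSp cs).1.all pvIsDig then pvA_loop (pvSp cs).2 else 0) := by
  induction cs with
  | nil => constructor <;> simp [pvB_scan, pvSp, pvA_loop, pvA_tokOK_eq]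
  | cons c rest ih =>
    obtain ⟨ih1, ih2⟩ := ih
    by_cases hc : c = ','
    · subst hc
      constructor <;> simp [pvB_scan, pvSp, pvA_loop, ih1, pvA_tokOK_eq]
    · have hsp : pvSp (c :: rest) = (c :: (pvSp rest).1, (pvSp rest).2) := by
        simp [pvSp, hc]
      have hdig : ∀ b : Int, (if '0' ≤ c ∧ c ≤ '9' then b else 0)
          = if pvIsDig c = true then b else 0 := by
        intro b
        by_cases h : '0' ≤ c ∧ c ≤ '9' <;> simp [h, pvIsDig_iff]
      constructor
      · -- at_start = true
        rw [hsp]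
        simp only [pvB_scan, if_neg hc]
        by_cases hm : c = '-'
        · subst hm
          rw [if_pos (by simp), ih2]
          simp [pvA_loop, pvA_tokOK_cons]
        · rw [if_neg (by simp [hm]), hdig, ih2]
          by_cases hd : pvIsDig c = true
          · simp [pvA_loop, pvA_tokOK_cons, hd]
          · have hd' : pvIsDig c = false := by revert hd; cases pvIsDig c <;> simp
            simp [pvA_loop, pvA_tokOK_cons, hd', beq_eq_false_iff_ne.mpr hm]
      · -- at_start = false
        rw [hsp]
        simp only [pvB_scan, if_neg hc, Bool.false_and, Bool.false_eq_true, if_false]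
        rw [hdig, ih2]
        by_cases hd : pvIsDig c = true
        · simp [List.all_cons, hd]
        · have hd' : pvIsDig c = false := by revert hd; cases pvIsDig c <;> simp
          simp [List.all_cons, hd']

-- ===== VERDICT (by name: the statement is the Claim_ definition above) =====
theorem validate_digits_spec : Claim_equal_validate_digits := by
  intro s _
  unfold Spec_validate_digits validate_digits validate_digits_alt
  rw [pvSplitOn_eq]
  exact ((pvScan_eq _).1).symm
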